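-- pv_equiv track=rewrite | github.com/ashutoshpandey5891/rosalind_problems | textbook/number_nd_pattern.py | pattern2number
-- ===== SOURCE A (Python) =====
-- def pattern2number(pattern):
--     '''
--     maps pattern to alphabetical position of pattern from 4**k patterns
--     '''
--     k = len(pattern)
--     dna_list = ['A','C','G','T']
--     number = 0
--     for i in range(k):
--         p = pattern[i]
--         idx = dna_list.index(p)
--
--         number += idx*4**(k-1-i)
--     return number
-- ===== SOURCE B (Python) =====
-- def pattern2number(pattern):
--     '''
--     maps pattern to alphabetical position of pattern from 4**k patterns
--     '''
--     dna_list = ['A','C','G','T']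
--     if not pattern:
--         return 0
--     return 4 * pattern2number(pattern[:-1]) + dna_list.index(pattern[-1])
-- ===== Notes on version B (the rewrite author's own statement) =====
-- stated objective: alternative
-- what changed: Replaces the flat loop that sums index-weighted powers 4**(k-1-i) with the textbook recursion 4*pattern2number(prefix) + index(last symbol).
import Mathlib
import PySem

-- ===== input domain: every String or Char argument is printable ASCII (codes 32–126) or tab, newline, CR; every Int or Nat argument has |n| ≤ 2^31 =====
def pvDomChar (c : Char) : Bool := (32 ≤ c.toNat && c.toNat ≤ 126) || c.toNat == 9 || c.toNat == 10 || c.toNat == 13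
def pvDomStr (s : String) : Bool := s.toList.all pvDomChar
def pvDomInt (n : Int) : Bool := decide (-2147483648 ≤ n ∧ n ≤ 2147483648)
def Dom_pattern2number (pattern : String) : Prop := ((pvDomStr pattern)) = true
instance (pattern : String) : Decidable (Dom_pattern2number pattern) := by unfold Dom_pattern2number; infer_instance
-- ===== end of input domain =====

-- B replaces A's index-weighted power summation loop by the textbook recursion on the
-- pattern's prefix (alternative decomposition, same cost).

-- shared transliteration of `dna_list.index(p)` (dna_list = ['A','C','G','T']);
-- Python raises ValueError when p is absent — those inputs are excluded by Pre_ below,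
-- here the port returns a default 0.
def dnaIndex (p : Char) : Int :=
  ((PySem.List.index? ['A','C','G','T'] p).getD 0 : Nat)

-- ===== PORT A =====
-- `for i in range(k): number += dna_list.index(pattern[i]) * 4**(k-1-i)`
def pattern2number (pattern : String) : Int :=
  let k : Int := (pattern.toList.length : Int)
  (PySem.List.pyRange 0 k 1).foldl
    (fun number i =>
      let p : Char := (PySem.Str.pyGet? pattern i).getD 'A'
      let idx : Int := dnaIndex p
      number + idx * 4 ^ (k - 1 - i).toNat) 0

-- ===== PORT B =====
-- Source B's recursion: empty → 0, else 4*rec(pattern[:-1]) + index(pattern[-1])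
def p2nRec (l : List Char) : Int :=
  if h : l = [] then 0
  else 4 * p2nRec l.dropLast + dnaIndex (l.getLast h)
termination_by l.length
decreasing_by
  simp only [List.length_dropLast]
  exact Nat.sub_lt (List.length_pos_iff.mpr h) Nat.one_pos

def pattern2number_alt (pattern : String) : Int :=
  p2nRec pattern.toList

-- ===== PRECONDITION & SPEC =====
-- Pre_ excludes exactly the patterns containing a symbol outside {A,C,G,T}, on which
-- Python A raises ValueError (and B raises ValueError too).
def Pre_pattern2number (pattern : String) : Prop :=
  pattern.toList.all (fun c => c ∈ (['A','C','G','T'] : List Char)) = true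
instance (pattern : String) : Decidable (Pre_pattern2number pattern) := by
  unfold Pre_pattern2number; infer_instance

def pvWitness_pattern2number : String := "GATTACA"

def Spec_pattern2number (pattern : String) (out : Int) : Prop := out = pattern2number_alt pattern
instance (pattern : String) (out : Int) : Decidable (Spec_pattern2number pattern out) := by
  unfold Spec_pattern2number; infer_instance

-- ===== CLAIM (what is proved, stated in full; the proofs are below) =====
def Claim_equal_pattern2number : Prop := ∀ (pattern : String), Dom_pattern2number pattern → Pre_pattern2number pattern → Spec_pattern2number pattern (pattern2number pattern)

-- ===== LEMMAS AND PROOFS =====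

-- A's loop, generalized over the character list (A reads pattern[i] through the string).
def aCore (l : List Char) : Int :=
  (PySem.List.pyRange 0 (l.length : Int) 1).foldl
    (fun number i => number + dnaIndex (l[i.toNat]?.getD 'A') * 4 ^ ((l.length : Int) - 1 - i).toNat) 0

lemma pattern2number_eq_aCore (pattern : String) :
    pattern2number pattern = aCore pattern.toList := by
  simp only [pattern2number, aCore]
  apply PySem.List.foldl_congr_mem'
  intro i hi acc
  rw [PySem.List.mem_pyRange_one] at hi
  have h0 : (0 : Int) ≤ i := hi.1
  rw [PySem.Str.pyGet?, PySem.Chars.pyGet?, PySem.List.pyGet?_of_nonneg _ h0]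

lemma aCore_nil : aCore [] = 0 := by simp [aCore, PySem.List.pyRange_one_eq_nil]

lemma aCore_concat (l : List Char) (c : Char) :
    aCore (l ++ [c]) = 4 * aCore l + dnaIndex c := by
  have hlen : ((l ++ [c]).length : Int) = (l.length : Int) + 1 := by
    simp
  have hrange : PySem.List.pyRange 0 ((l.length : Int) + 1) 1
      = PySem.List.pyRange 0 (l.length : Int) 1 ++ [(l.length : Int)] := by
    exact PySem.List.pyRange_one_succ_right (by positivity)
  unfold aCore
  rw [hlen, hrange, List.foldl_append]
  simp only [List.foldl_cons, List.foldl_nil]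
  rw [PySem.List.foldl_add (g := fun i => dnaIndex ((l ++ [c])[i.toNat]?.getD 'A') * 4 ^ (((l.length : Int) + 1) - 1 - i).toNat),
      PySem.List.foldl_add (g := fun i => dnaIndex (l[i.toNat]?.getD 'A') * 4 ^ (((l.length : Int)) - 1 - i).toNat)]
  have hmap : (PySem.List.pyRange 0 (l.length : Int) 1).map
        (fun i => dnaIndex ((l ++ [c])[i.toNat]?.getD 'A') * 4 ^ (((l.length : Int) + 1) - 1 - i).toNat)
      = (PySem.List.pyRange 0 (l.length : Int) 1).map
        (fun i => 4 * (dnaIndex (l[i.toNat]?.getD 'A') * 4 ^ (((l.length : Int)) - 1 - i).toNat)) := by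
    apply List.map_congr_left
    intro i hi
    rw [PySem.List.mem_pyRange_one] at hi
    obtain ⟨h0, h1⟩ := hi
    have hi' : i.toNat < l.length := by omega
    have hget : (l ++ [c])[i.toNat]? = l[i.toNat]? := by
      rw [List.getElem?_append_left hi']
    rw [hget]
    have hexp : ((l.length : Int) + 1 - 1 - i).toNat = ((l.length : Int) - 1 - i).toNat + 1 := by
      omega
    rw [hexp, pow_succ]
    ring
  rw [hmap, List.sum_map_mul_left]
  have hlast : (l ++ [c])[((l.length : Int)).toNat]?.getD 'A' = c := by
    simp
  rw [hlast]
  have hexp0 : ((l.length : Int) + 1 - 1 - (l.length : Int)).toNat = 0 := by omega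
  rw [hexp0]
  ring

lemma p2nRec_nil : p2nRec [] = 0 := by simp [p2nRec]

lemma p2nRec_concat (l : List Char) (c : Char) :
    p2nRec (l ++ [c]) = 4 * p2nRec l + dnaIndex c := by
  rw [p2nRec.eq_def]
  simp

lemma aCore_eq_p2nRec (l : List Char) : aCore l = p2nRec l := by
  induction l using List.reverseRecOn with
  | nil => rw [aCore_nil, p2nRec_nil]
  | append_singleton l c ih => rw [aCore_concat, p2nRec_concat, ih]

-- ===== VERDICT (by name: the statement is the Claim_ definition above) =====
theorem pattern2number_spec : Claim_equal_pattern2number := by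
  intro pattern _ _
  unfold Spec_pattern2number pattern2number_alt
  rw [pattern2number_eq_aCore, aCore_eq_p2nRec]
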